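-- pv_equiv track=rewrite | github.com/gzhu725/Everybody-Codes-2025 | Day7/part3.py | generate
-- ===== SOURCE A (Python) =====
-- def generate(prefix, rules, min_len=7, max_len=11, seen=None):
--     if seen is None:
--         seen = set()
--     if len(prefix) >= min_len:
--         seen.add(prefix)
--     if len(prefix) >= max_len:
--         return seen
--
--     last = prefix[-1]
--     if last not in rules:
--         return seen
--
--     for nxt in rules[last]:
--         generate(prefix + nxt, rules, min_len, max_len, seen)
--
--     return seen
-- ===== SOURCE B (Python) =====
-- def generate(prefix, rules, min_len=7, max_len=11, seen=None):
--     if seen is None: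
--         seen = set()
--     stack = [prefix]
--     while stack:
--         p = stack.pop()
--         if len(p) >= min_len:
--             seen.add(p)
--         if len(p) >= max_len:
--             continue
--         last = p[-1]
--         if last in rules:
--             for nxt in reversed(rules[last]):
--                 stack.append(p + nxt)
--     return seen
-- ===== Notes on version B (the rewrite author's own statement) =====
-- stated objective: idiomatic
-- what changed: A's recursive DFS (mutating a shared set through recursive calls) is replaced by an iterative DFS with an explicit stack: pop a prefix, record it when long enough, and push its rule expansions in reverse so the set-insertion order is identical.
-- outside the precondition, e.g. on generate('b', {'a': ['']}, 1, 3, None): A returns {'b'}, B returns {'b'}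
import Mathlib
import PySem

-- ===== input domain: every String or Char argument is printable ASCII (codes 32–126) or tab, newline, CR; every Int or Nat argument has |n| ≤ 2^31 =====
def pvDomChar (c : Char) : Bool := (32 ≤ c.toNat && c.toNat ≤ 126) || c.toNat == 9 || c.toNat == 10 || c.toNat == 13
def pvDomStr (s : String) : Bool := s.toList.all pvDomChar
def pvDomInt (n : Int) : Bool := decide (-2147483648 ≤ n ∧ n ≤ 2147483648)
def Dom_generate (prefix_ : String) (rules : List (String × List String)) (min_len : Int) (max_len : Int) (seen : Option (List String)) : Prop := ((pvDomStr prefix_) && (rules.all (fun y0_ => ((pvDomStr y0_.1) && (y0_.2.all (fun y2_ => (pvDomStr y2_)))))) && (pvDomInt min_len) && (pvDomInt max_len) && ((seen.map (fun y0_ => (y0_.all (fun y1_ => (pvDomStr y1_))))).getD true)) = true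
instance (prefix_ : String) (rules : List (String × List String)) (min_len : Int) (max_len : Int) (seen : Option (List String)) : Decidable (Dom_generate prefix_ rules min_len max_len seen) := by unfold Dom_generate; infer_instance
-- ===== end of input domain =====

-- B replaces A's recursive DFS by an explicit-stack iterative DFS (children pushed in reverse, so the
-- set-insertion order is identical); equivalence is about the RETURN value — in Python both A and B
-- perform the same .add mutations on a passed-in `seen` set.

-- ===== PORT A =====
-- recursive DFS; fuel = depth budget (totality guard only: under Pre_generate the recursion depth is < max_len.toNat + 1)
def genAux (rules : List (String × List String)) (mn mx : Int) : Nat → String → List String → List String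
  | 0, _, seen => seen
  | f+1, p, seen =>
    let seen1 := if mn ≤ PySem.Str.len p then PySem.Set.add seen p else seen
    if mx ≤ PySem.Str.len p then seen1
    else
      match PySem.Str.pyGet? p (-1) with
      | none => seen1          -- Python raises IndexError here (empty prefix); excluded by Pre_generate
      | some c =>
        match (PySem.Dict.mk rules).get? (String.singleton c) with
        | none => seen1
        | some nxts => nxts.foldl (fun s nxt => genAux rules mn mx f (p ++ nxt) s) seen1

def generate (prefix_ : String) (rules : List (String × List String)) (min_len : Int) (max_len : Int) (seen : Option (List String)) : List String :=
  genAux rules min_len max_len (max_len.toNat + 1) prefix_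
    (match seen with | none => PySem.Set.empty | some l => l)

-- ===== PORT B =====
-- iteration-count fuel for B's while-loop (totality guard only: under Pre_generate it is exactly the number of pops)
def cnt (rules : List (String × List String)) (mx : Int) : Nat → String → Nat
  | 0, _ => 0
  | f+1, p =>
    if mx ≤ PySem.Str.len p then 1
    else
      match PySem.Str.pyGet? p (-1) with
      | none => 1
      | some c =>
        match (PySem.Dict.mk rules).get? (String.singleton c) with
        | none => 1
        | some nxts => 1 + (nxts.map (fun nxt => cnt rules mx f (p ++ nxt))).sum

-- the while-loop over the explicit stack (head of the list = top of the stack)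
def loopB (rules : List (String × List String)) (mn mx : Int) : Nat → List String → List String → List String
  | _, [], seen => seen
  | 0, _ :: _, seen => seen
  | g+1, p :: st, seen =>
    let seen1 := if mn ≤ PySem.Str.len p then PySem.Set.add seen p else seen
    if mx ≤ PySem.Str.len p then loopB rules mn mx g st seen1
    else
      match PySem.Str.pyGet? p (-1) with
      | none => seen1          -- Python raises IndexError here; excluded by Pre_generate
      | some c =>
        match (PySem.Dict.mk rules).get? (String.singleton c) with
        | none => loopB rules mn mx g st seen1
        | some nxts => loopB rules mn mx g (nxts.reverse.foldl (fun acc nxt => (p ++ nxt) :: acc) st) seen1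

def generate_alt (prefix_ : String) (rules : List (String × List String)) (min_len : Int) (max_len : Int) (seen : Option (List String)) : List String :=
  loopB rules min_len max_len (cnt rules max_len (max_len.toNat + 1) prefix_) [prefix_]
    (match seen with | none => PySem.Set.empty | some l => l)

-- ===== PRECONDITION & SPEC =====
-- Pre_ excludes (a) an empty prefix with max_len > 0, where A raises IndexError, and (b) unless the
-- prefix is already at max_len, rules containing an empty right-hand expansion: a reachable one makes
-- A recurse forever (RecursionError), and reachability is not closed-form, so unreachable ones (where
-- A returns normally) are excluded with them.
def Pre_generate (prefix_ : String) (rules : List (String × List String)) (min_len : Int) (max_len : Int) (seen : Option (List String)) : Prop :=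
  (prefix_ ≠ "" ∨ max_len ≤ 0) ∧
  (max_len ≤ PySem.Str.len prefix_ ∨ ∀ kv ∈ rules, ∀ nxt ∈ kv.2, nxt ≠ "")
instance (prefix_ : String) (rules : List (String × List String)) (min_len : Int) (max_len : Int) (seen : Option (List String)) : Decidable (Pre_generate prefix_ rules min_len max_len seen) := by unfold Pre_generate; infer_instance

def pvWitness_generate : String × (List (String × List String)) × Int × Int × Option (List String) :=
  ("a", [("a", ["b", "c"])], 2, 3, none)

def Spec_generate (prefix_ : String) (rules : List (String × List String)) (min_len : Int) (max_len : Int) (seen : Option (List String)) (out : List String) : Prop := out = generate_alt prefix_ rules min_len max_len seen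
instance (prefix_ : String) (rules : List (String × List String)) (min_len : Int) (max_len : Int) (seen : Option (List String)) (out : List String) : Decidable (Spec_generate prefix_ rules min_len max_len seen out) := by unfold Spec_generate; infer_instance

-- ===== CLAIM (what is proved, stated in full; the proofs are below) =====
def Claim_equal_generate : Prop := ∀ (prefix_ : String) (rules : List (String × List String)) (min_len : Int) (max_len : Int) (seen : Option (List String)), Dom_generate prefix_ rules min_len max_len seen → Pre_generate prefix_ rules min_len max_len seen → Spec_generate prefix_ rules min_len max_len seen (generate prefix_ rules min_len max_len seen)

-- ===== LEMMAS AND PROOFS =====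

lemma toList_ne_nil_of_ne_empty (s : String) (h : s ≠ "") : s.toList ≠ [] := by
  simpa [String.toList_eq_nil_iff] using h

lemma dictGet_mem (rules : List (String × List String)) (k : String) (v : List String)
    (h : (PySem.Dict.mk rules).get? k = some v) : ∃ kv ∈ rules, kv.2 = v := by
  induction rules with
  | nil => simp [PySem.Dict.get?] at h
  | cons a rest ih =>
    rcases a with ⟨ka, va⟩
    rw [PySem.Dict.get?_mk_cons] at h
    by_cases hk : (ka == k) = true
    · simp [hk] at h; exact ⟨(ka, va), by simp, by simp [h]⟩
    · simp [hk] at h; rcases ih h with ⟨kv, hm, he⟩; exact ⟨kv, by simp [hm], he⟩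

-- main invariant: with exactly cnt f p fuel for p's subtree, popping p from the stack
-- computes A's recursive DFS on p and then continues with the rest of the stack
lemma bridge (rules : List (String × List String)) (mn mx : Int)
    (hgr : ∀ kv ∈ rules, ∀ nxt ∈ kv.2, nxt ≠ "") :
    ∀ (f : Nat) (p : String) (st seen : List String) (g : Nat),
      mx.toNat + 1 ≤ f + p.toList.length → 1 ≤ f →
      (p ≠ "" ∨ mx ≤ (p.toList.length : Int)) →
      loopB rules mn mx (cnt rules mx f p + g) (p :: st) seen
        = loopB rules mn mx g st (genAux rules mn mx f p seen) := by
  intro f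
  induction f with
  | zero => intro p st seen g _ hf _; omega
  | succ f ih =>
    intro p st seen g hH _ hne
    have hll : p.toList.length = p.length := String.length_toList
    by_cases hmx : mx ≤ (p.length : Int)
    · have hc : cnt rules mx (f+1) p = 1 := by simp [cnt, PySem.Str.len_eq, hll, hmx]
      rw [hc, Nat.add_comm 1 g]
      simp [loopB, genAux, PySem.Str.len_eq, hll, hmx]
    · have hpne : p ≠ "" := by
        rcases hne with h | h
        · exact h
        · exact absurd (by omega : mx ≤ (p.length : Int)) hmx
      have hnil : p.toList ≠ [] := toList_ne_nil_of_ne_empty p hpne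
      cases hgl : p.toList.getLast? with
      | none => exact absurd (List.getLast?_eq_none_iff.mp hgl) hnil
      | some c =>
        have hpgl : PySem.List.pyGet? p.toList (-1) = some c := by
          rw [PySem.List.pyGet?_neg_one]; exact hgl
        cases hd : (PySem.Dict.mk rules).get? (String.singleton c) with
        | none =>
          have hc : cnt rules mx (f+1) p = 1 := by
            simp [cnt, PySem.Str.len_eq, hll, hmx, hpgl, hd]
          rw [hc, Nat.add_comm 1 g]
          simp [loopB, genAux, PySem.Str.len_eq, hll, hmx, hpgl, hd]
        | some nxts =>
          have hmem : ∀ x ∈ nxts, x ≠ "" := by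
            obtain ⟨kv, hkv, he⟩ := dictGet_mem rules (String.singleton c) nxts hd
            intro x hx
            exact hgr kv hkv x (he ▸ hx)
          have hchild : ∀ x ∈ nxts,
              mx.toNat + 1 ≤ f + (p ++ x).toList.length ∧ 1 ≤ f ∧
              ((p ++ x) ≠ "" ∨ mx ≤ ((p ++ x).toList.length : Int)) := by
            intro x hx
            have hxl : 1 ≤ x.toList.length :=
              List.length_pos_of_ne_nil (toList_ne_nil_of_ne_empty x (hmem x hx))
            have hlen : (p ++ x).toList.length = p.toList.length + x.toList.length := by
              simp [String.toList_append]
            refine ⟨?_, by omega, Or.inl (fun h0 => ?_)⟩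
            · rw [hlen]; omega
            · have hx0 := congrArg String.toList h0
              simp [String.toList_append] at hx0
              exact hpne (by simpa [String.toList_eq_nil_iff] using hx0.1)
          have hc : cnt rules mx (f+1) p
              = 1 + (nxts.map (fun x => cnt rules mx f (p ++ x))).sum := by
            simp [cnt, PySem.Str.len_eq, hll, hmx, hpgl, hd]
          rw [hc]
          rw [show 1 + (nxts.map (fun x => cnt rules mx f (p ++ x))).sum + g
              = ((nxts.map (fun x => cnt rules mx f (p ++ x))).sum + g) + 1 from by omega]
          simp [loopB, genAux, PySem.Str.len_eq, hll, hmx, hpgl, hd]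
          -- process the pushed children one by one
          have inner : ∀ (L : List String), (∀ x ∈ L, x ∈ nxts) →
              ∀ (st' seen' : List String) (g' : Nat),
              loopB rules mn mx ((L.map (fun x => cnt rules mx f (p ++ x))).sum + g')
                  (L.map (fun x => p ++ x) ++ st') seen'
                = loopB rules mn mx g' st'
                    (L.foldl (fun s x => genAux rules mn mx f (p ++ x) s) seen') := by
            intro L
            induction L with
            | nil => intro _ st' seen' g'; simp
            | cons x xs ihL =>
              intro hsub st' seen' g'
              have hx := hchild x (hsub x (by simp))
              rw [show ((x :: xs).map (fun x => cnt rules mx f (p ++ x))).sum + g'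
                  = cnt rules mx f (p ++ x)
                    + ((xs.map (fun x => cnt rules mx f (p ++ x))).sum + g') from by
                simp; omega]
              simp only [List.map_cons, List.cons_append, List.foldl_cons]
              rw [ih (p ++ x) (xs.map (fun x => p ++ x) ++ st') seen'
                    ((xs.map (fun x => cnt rules mx f (p ++ x))).sum + g') hx.1 hx.2.1 hx.2.2]
              exact ihL (fun y hy => hsub y (by simp [hy])) st'
                (genAux rules mn mx f (p ++ x) seen') g'
          exact inner nxts (fun _ h => h) st _ g

lemma main_core (rules : List (String × List String)) (mn mx : Int) (p : String) (s0 : List String)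
    (hne : p ≠ "" ∨ mx ≤ 0)
    (hgood : mx ≤ PySem.Str.len p ∨ ∀ kv ∈ rules, ∀ nxt ∈ kv.2, nxt ≠ "") :
    genAux rules mn mx (mx.toNat + 1) p s0
      = loopB rules mn mx (cnt rules mx (mx.toNat + 1) p) [p] s0 := by
  rcases hgood with hmx | hgr
  · -- the prefix is already at max_len: one pop / no recursion on either side
    have hmx' : mx ≤ (p.length : Int) := by
      rw [PySem.Str.len_eq] at hmx
      have : p.toList.length = p.length := String.length_toList
      omega
    have hc : cnt rules mx (mx.toNat + 1) p = 1 := by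
      simp [cnt, PySem.Str.len_eq, hmx']
    have e1 : loopB rules mn mx 1 [p] s0 = loopB rules mn mx (0 + 1) [p] s0 := rfl
    rw [hc, e1]
    simp [loopB, genAux, PySem.Str.len_eq, hmx']
  · have h0 := bridge rules mn mx hgr (mx.toNat + 1) p [] s0 0
      (by omega) (by omega)
      (by rcases hne with h | h
          · exact Or.inl h
          · exact Or.inr (by have := Int.natCast_nonneg p.toList.length; omega))
    rw [Nat.add_zero] at h0
    exact h0.symm

-- ===== VERDICT (by name: the statement is the Claim_ definition above) =====
theorem generate_spec : Claim_equal_generate := by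
  intro prefix_ rules mn mx seen _ hpre
  rcases hpre with ⟨hne, hgood⟩
  unfold Spec_generate generate generate_alt
  exact main_core rules mn mx prefix_ _ hne hgood
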